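-- pv_equiv track=rewrite | github.com/gstamatelat/antichamber | src/functions.py | enumerate_text_partitions
-- ===== SOURCE A (Python) =====
-- def enumerate_text_partitions(text, k):
--     partitions = []
--     text = text.split(" ")
--     assert len(text) >= k
--     groups = []
--     for i in range(k - 1):
--         groups.append([text[0]])
--         text = text[1:]
--     groups.append(text)
--     partitions.append("\\\\".join([" ".join(g) for g in groups]))
--     while True:
--         c = 0
--         for i in reversed(range(0, k)):
--             if len(groups[i]) > 1:
--                 c = i
--                 break
--         if c == 0:
--             return partitions
--         groups[c - 1].append(groups[c][0])
--         groups[c] = groups[c][1:]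
--         for i in range(c, k - 1):
--             groups[i + 1] = groups[i][1:] + groups[i + 1]
--             groups[i] = [groups[i][0]]
--         partitions.append("\\\\".join([" ".join(g) for g in groups]))
-- ===== SOURCE B (Python) =====
-- from itertools import combinations
--
--
-- def enumerate_text_partitions(text, k):
--     words = text.split(" ")
--     assert len(words) >= k
--     n = len(words)
--     partitions = []
--     for cuts in combinations(range(1, n), max(k - 1, 0)):
--         bounds = [0, *cuts, n]
--         partitions.append(
--             "\\\\".join(" ".join(words[a:b]) for a, b in zip(bounds, bounds[1:]))
--         )
--     return partitions
-- ===== Notes on version B (the rewrite author's own statement) =====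
-- stated objective: idiomatic
-- what changed: B enumerates the k-1 cut positions directly with itertools.combinations and slices the word list at each cut tuple, replacing A's odometer loop that repeatedly shuffles words between group lists with a cascade of list rebuilds.
import Mathlib
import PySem

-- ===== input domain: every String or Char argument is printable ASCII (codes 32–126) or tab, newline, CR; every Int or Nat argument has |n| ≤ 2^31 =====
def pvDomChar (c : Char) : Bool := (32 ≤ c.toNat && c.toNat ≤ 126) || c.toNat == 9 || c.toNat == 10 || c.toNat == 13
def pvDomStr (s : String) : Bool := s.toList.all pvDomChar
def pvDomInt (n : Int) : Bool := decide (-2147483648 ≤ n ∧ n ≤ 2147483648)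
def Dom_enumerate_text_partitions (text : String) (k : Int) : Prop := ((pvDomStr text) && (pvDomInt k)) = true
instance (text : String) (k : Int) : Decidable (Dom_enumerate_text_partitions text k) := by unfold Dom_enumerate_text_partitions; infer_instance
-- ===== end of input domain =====

-- B replaces A's odometer loop (which shuffles words between group lists) by direct
-- enumeration of the k-1 cut positions with itertools.combinations; same outputs, same order.

-- ===== PORT A =====

-- '"\\\\".join([" ".join(g) for g in groups])'
def etpRender (groups : List (List String)) : String :=
  PySem.Str.join "\\\\" (groups.map (fun g => PySem.Str.join " " g))

-- 'c = 0; for i in reversed(range(0, k)): if len(groups[i]) > 1: c = i; break'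
-- (groups[i] is in range whenever Python reaches it; pyGetD [] is only a totality guard)
def etpFindC (k : Int) (groups : List (List String)) : Int :=
  (((PySem.List.pyRange 0 k 1).reverse).findSome? (fun i =>
      if (PySem.List.pyGetD groups i []).length > 1 then some i else none)).getD 0

-- the three mutation statements plus the cascade 'for i in range(c, k-1)' of A's loop body
def etpStep (k c : Int) (groups : List (List String)) : List (List String) :=
  let gc := PySem.List.pyGetD groups c []
  let groups1 := PySem.List.pySetD groups (c-1)
      (PySem.List.pyGetD groups (c-1) [] ++ [PySem.List.pyGetD gc 0 ""])
  let groups2 := PySem.List.pySetD groups1 c (PySem.List.slice gc (some 1) none)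
  (PySem.List.pyRange c (k-1) 1).foldl (fun gs i =>
      let gi := PySem.List.pyGetD gs i []
      let gs1 := PySem.List.pySetD gs (i+1)
          (PySem.List.slice gi (some 1) none ++ PySem.List.pyGetD gs (i+1) [])
      PySem.List.pySetD gs1 i [PySem.List.pyGetD gi 0 ""]) groups2

-- 'while True: …' (fuel is only a totality guard; it is never exhausted on inputs in Pre_)
def etpLoop (k : Int) : Nat → List (List String) → List String → List String
  | 0, _, partitions => partitions
  | fuel+1, groups, partitions =>
    let c := etpFindC k groups
    if c = 0 then partitions
    else
      let groups' := etpStep k c groups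
      etpLoop k fuel groups' (partitions ++ [etpRender groups'])

def enumerate_text_partitions (text : String) (k : Int) : List String :=
  let ws := (PySem.Str.split? text " ").getD []
  if ((ws.length : Int) < k) then []  -- 'assert len(text) >= k' fails: excluded by Pre_
  else
    -- 'for i in range(k - 1): groups.append([text[0]]); text = text[1:]'
    let st := (PySem.List.pyRange 0 (k-1) 1).foldl
      (fun (st : List (List String) × List String) _ =>
        (st.1 ++ [[PySem.List.pyGetD st.2 0 ""]], PySem.List.slice st.2 (some 1) none))
      ([], ws)
    let groups := st.1 ++ [st.2]
    etpLoop k (2 ^ ws.length * (ws.length + 1)) groups [etpRender groups]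

-- ===== PORT B =====

-- '"\\\\".join(" ".join(words[a:b]) for a, b in zip(bounds, bounds[1:]))' with bounds = [0, *cuts, n]
def etpAltRender (ws : List String) (n : Int) (cuts : List Int) : String :=
  let bounds := 0 :: cuts ++ [n]
  PySem.Str.join "\\\\" ((bounds.zip bounds.tail).map (fun ab =>
    PySem.Str.join " " (PySem.List.slice ws (some ab.1) (some ab.2))))

def enumerate_text_partitions_alt (text : String) (k : Int) : List String :=
  let ws := (PySem.Str.split? text " ").getD []
  if ((ws.length : Int) < k) then []  -- 'assert len(words) >= k' fails: excluded by Pre_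
  else
    let n : Int := ws.length
    (PySem.List.combinations (PySem.List.pyRange 1 n 1) (max (k-1) 0).toNat).map
      (etpAltRender ws n)

-- ===== PRECONDITION & SPEC =====
-- Pre_ excludes exactly the inputs where A's 'assert len(text) >= k' raises AssertionError.
def Pre_enumerate_text_partitions (text : String) (k : Int) : Prop :=
  k ≤ (((PySem.Str.split? text " ").getD []).length : Int)
instance (text : String) (k : Int) : Decidable (Pre_enumerate_text_partitions text k) := by
  unfold Pre_enumerate_text_partitions; infer_instance

def pvWitness_enumerate_text_partitions : String × Int := ("a b c", 2)

def Spec_enumerate_text_partitions (text : String) (k : Int) (out : List String) : Prop := out = enumerate_text_partitions_alt text k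
instance (text : String) (k : Int) (out : List String) : Decidable (Spec_enumerate_text_partitions text k out) := by unfold Spec_enumerate_text_partitions; infer_instance

-- ===== CLAIM (what is proved, stated in full; the proofs are below) =====
def Claim_equal_enumerate_text_partitions : Prop := ∀ (text : String) (k : Int), Dom_enumerate_text_partitions text k → Pre_enumerate_text_partitions text k → Spec_enumerate_text_partitions text k (enumerate_text_partitions text k)

-- ===== LEMMAS AND PROOFS =====

-- cut lists: the k-1 group boundaries, strictly increasing inside [1, n)
def etpValid (n : Int) : Int → List Int → Prop
  | _, [] => True
  | a, c :: cs => a ≤ c ∧ c + cs.length < n ∧ etpValid n (c+1) cs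

-- the minimal cut list [a, a+1, …, a+m-1]
def etpFirst (a : Int) : Nat → List Int
  | 0 => []
  | m+1 => a :: etpFirst (a+1) m

-- every cut at its maximum (the final state of A's loop)
def etpIsLast (n : Int) : List Int → Bool
  | [] => true
  | c :: cs => (c + cs.length + 1 == n) && etpIsLast n cs

-- the index c A's scan finds (valid when ¬ etpIsLast)
def etpCOf (n : Int) : List Int → Nat
  | [] => 0
  | _ :: cs => if etpIsLast n cs then 1 else etpCOf n cs + 1

-- lexicographic successor of a cut list
def etpSucc (n : Int) : List Int → List Int
  | [] => []
  | c :: cs => if etpIsLast n cs then (c+1) :: etpFirst (c+2) cs.length else c :: etpSucc n cs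

-- all cut lists ≥ cs in CPython's combinations order
def etpTail (n : Int) : List Int → List (List Int)
  | [] => [[]]
  | c :: cs => (etpTail n cs).map (c :: ·) ++
      PySem.List.combinations (PySem.List.pyRange (c+1) n 1) (cs.length + 1)

-- the groups list determined by a cut list (b = left bound of the first group)
def etpGroupsOf (ws : List String) : Int → List Int → List (List String)
  | b, [] => [PySem.List.slice ws (some b) none]
  | b, c :: cs => PySem.List.slice ws (some b) (some c) :: etpGroupsOf ws c cs

-- distributing a stream: m singleton groups then the rest (effect of A's cascade)
def etpHeads : Nat → List String → List (List String)
  | 0, s => [s]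
  | m+1, s => s.take 1 :: etpHeads m s.tail

-- slice algebra

theorem sl_tail_take {α : Type} (l : List α) (j : Nat) : (l.take (j+1)).tail = l.tail.take j := by
  cases l <;> simp

theorem sl_drop_shift {α : Type} (ws : List α) (a b : Int) (h0 : 0 ≤ a) (hab : a ≤ b) :
    ws.drop b.toNat = (ws.drop a.toNat).drop (b.toNat - a.toNat) := by
  rw [List.drop_drop]; congr 1; omega

theorem sl_app {α : Type} (ws : List α) (a b c : Int) (h0 : 0 ≤ a) (hab : a ≤ b) (hbc : b ≤ c) :
    PySem.List.slice ws (some a) (some b) ++ PySem.List.slice ws (some b) (some c)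
      = PySem.List.slice ws (some a) (some c) := by
  rw [PySem.List.slice_toNat ws h0 (le_trans h0 hab), PySem.List.slice_toNat ws (le_trans h0 hab) (le_trans (le_trans h0 hab) hbc), PySem.List.slice_toNat ws h0 (le_trans (le_trans h0 hab) hbc)]
  rw [sl_drop_shift ws a b h0 hab, ← List.take_add]
  congr 1; omega

theorem sl_app_none {α : Type} (ws : List α) (a b : Int) (h0 : 0 ≤ a) (hab : a ≤ b) :
    PySem.List.slice ws (some a) (some b) ++ PySem.List.slice ws (some b) none
      = PySem.List.slice ws (some a) none := by
  rw [PySem.List.slice_toNat ws h0 (le_trans h0 hab), PySem.List.slice_from ws (le_trans h0 hab), PySem.List.slice_from ws h0]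
  rw [sl_drop_shift ws a b h0 hab]
  exact List.take_append_drop _ _

theorem sl_to_len {α : Type} (ws : List α) (a : Int) (h0 : 0 ≤ a) :
    PySem.List.slice ws (some a) (some (ws.length : Int)) = PySem.List.slice ws (some a) none := by
  rw [PySem.List.slice_toNat ws h0 (by positivity), PySem.List.slice_from ws h0]
  apply List.take_of_length_le
  simp

theorem sl_len_some {α : Type} (ws : List α) (a b : Int) (h0 : 0 ≤ a) (hab : a ≤ b) (hb : b ≤ (ws.length : Int)) :
    ((PySem.List.slice ws (some a) (some b)).length : Int) = b - a := by
  rw [PySem.List.slice_toNat ws h0 (le_trans h0 hab)]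
  simp; omega

theorem sl_len_none {α : Type} (ws : List α) (a : Int) (h0 : 0 ≤ a) (ha : a ≤ (ws.length : Int)) :
    ((PySem.List.slice ws (some a) none).length : Int) = (ws.length : Int) - a := by
  rw [PySem.List.slice_from ws h0]; simp; omega

theorem sl_tail_some {α : Type} (ws : List α) (a b : Int) (h0 : 0 ≤ a) (hb : 0 ≤ b) :
    (PySem.List.slice ws (some a) (some b)).tail = PySem.List.slice ws (some (a+1)) (some b) := by
  rw [PySem.List.slice_toNat ws h0 hb, PySem.List.slice_toNat ws (by omega) hb]
  by_cases hab : a + 1 ≤ b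
  · rw [show b.toNat - a.toNat = (b.toNat - (a+1).toNat) + 1 by omega, sl_tail_take, List.tail_drop]
    congr 2; omega
  · rw [show b.toNat - (a+1).toNat = 0 by omega, show b.toNat - a.toNat = 0 by omega]; simp

theorem sl_tail_none {α : Type} (ws : List α) (a : Int) (h0 : 0 ≤ a) :
    (PySem.List.slice ws (some a) none).tail = PySem.List.slice ws (some (a+1)) none := by
  rw [PySem.List.slice_from ws h0, PySem.List.slice_from ws (by omega), List.tail_drop]
  congr 1; omega

theorem sl_single {α : Type} [Inhabited α] (ws : List α) (a : Int) (h0 : 0 ≤ a) (ha : a < (ws.length : Int)) :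
    PySem.List.slice ws (some a) (some (a+1)) = [ws.getD a.toNat default] := by
  rw [PySem.List.slice_toNat ws h0 (by omega)]
  have hlt : a.toNat < ws.length := by omega
  rw [show (a+1).toNat - a.toNat = 1 by omega, List.drop_eq_getElem_cons hlt]
  simp only [List.take_succ_cons, List.take_zero]
  simp [List.getElem?_eq_getElem hlt]

theorem sl_take1_none {α : Type} (ws : List α) (a : Int) (h0 : 0 ≤ a) :
    (PySem.List.slice ws (some a) none).take 1 = PySem.List.slice ws (some a) (some (a+1)) := by
  rw [PySem.List.slice_from ws h0, PySem.List.slice_toNat ws h0 (by omega)]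
  congr 1; omega

theorem sl_ne_nil {α : Type} (ws : List α) (a b : Int) (h0 : 0 ≤ a) (hab : a < b) (hb : b ≤ (ws.length : Int)) :
    PySem.List.slice ws (some a) (some b) ≠ [] := by
  have h := sl_len_some ws a b h0 (le_of_lt hab) hb
  intro hc; rw [hc] at h; simp at h; omega

theorem sl_none_ne_nil {α : Type} (ws : List α) (a : Int) (h0 : 0 ≤ a) (ha : a < (ws.length : Int)) :
    PySem.List.slice ws (some a) none ≠ [] := by
  have h := sl_len_none ws a h0 (le_of_lt ha)
  intro hc; rw [hc] at h; simp at h; omega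

theorem sl_zero_none {α : Type} (ws : List α) : PySem.List.slice ws (some 0) none = ws := by
  have := PySem.List.slice_from ws (a := 0) (by omega)
  simpa using this

-- cut-list combinatorics
theorem etpFirst_length (m : Nat) : ∀ a, (etpFirst a m).length = m := by
  induction m with
  | zero => intro a; rfl
  | succ m ih => intro a; simp [etpFirst, ih]

theorem etpSucc_length (n : Int) (cs : List Int) : (etpSucc n cs).length = cs.length := by
  induction cs with
  | nil => rfl
  | cons c cs ih =>
    simp only [etpSucc]
    split
    · simp [etpFirst_length]
    · simp [ih]

theorem etpValid_first (n : Int) (m : Nat) : ∀ a, a + m ≤ n → etpValid n a (etpFirst a m) := by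
  induction m with
  | zero => intro a _; trivial
  | succ m ih =>
    intro a h
    refine ⟨le_refl a, ?_, ih (a+1) (by push_cast at h ⊢; omega)⟩
    rw [etpFirst_length]
    push_cast at h ⊢; omega

theorem etpT1 (n : Int) (m : Nat) : ∀ a : Int, a + m ≤ n →
    etpTail n (etpFirst a m) = PySem.List.combinations (PySem.List.pyRange a n 1) m := by
  induction m with
  | zero => intro a _; simp [etpFirst, etpTail, PySem.List.combinations_zero]
  | succ m ih =>
    intro a h
    have ha : a < n := by push_cast at h; omega
    rw [etpFirst, etpTail, etpFirst_length, ih (a+1) (by push_cast at h ⊢; omega)]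
    rw [PySem.List.pyRange_one_cons ha, PySem.List.combinations_cons_succ]

theorem etpT2a (n : Int) (cs : List Int) : ∀ a, etpValid n a cs → etpIsLast n cs = true →
    etpTail n cs = [cs] := by
  induction cs with
  | nil => intro a _ _; rfl
  | cons c cs ih =>
    intro a ⟨h1, h2, h3⟩ hl
    simp only [etpIsLast, Bool.and_eq_true, beq_iff_eq] at hl
    obtain ⟨hc, hcs⟩ := hl
    rw [etpTail, ih (c+1) h3 hcs]
    rw [PySem.List.combinations_eq_nil_of_length_lt]
    · simp
    · rw [PySem.List.length_pyRange_one]; omega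

theorem etpT2b (n : Int) (cs : List Int) : ∀ a, etpValid n a cs → etpIsLast n cs = false →
    etpTail n cs = cs :: etpTail n (etpSucc n cs) := by
  induction cs with
  | nil => intro a _ h; simp [etpIsLast] at h
  | cons c cs ih =>
    intro a ⟨h1, h2, h3⟩ hl
    simp only [etpIsLast, Bool.and_eq_false_iff] at hl
    by_cases hcs : etpIsLast n cs = true
    · have hc : ¬ (c + cs.length + 1 = n) := by
        rcases hl with h | h
        · simpa using h
        · rw [hcs] at h; simp at h
      have hlt : c + (cs.length : Int) + 1 < n := by omega
      rw [etpTail, etpT2a n cs (c+1) h3 hcs]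
      rw [etpSucc, if_pos hcs, etpTail, etpFirst_length]
      rw [etpT1 n cs.length (c+2) (by omega)]
      have hr : PySem.List.pyRange (c+1) n 1 = (c+1) :: PySem.List.pyRange (c+2) n 1 := by
        rw [PySem.List.pyRange_one_cons (show c+1 < n by omega), show c+1+1 = c+2 by ring]
      rw [hr, PySem.List.combinations_cons_succ, show c+1+1 = c+2 by ring]
      simp
    · have hcs' : etpIsLast n cs = false := by simp at hcs; exact hcs
      rw [etpTail, ih (c+1) h3 hcs']
      rw [etpSucc, if_neg (by simp [hcs']), etpTail, etpSucc_length]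
      simp

theorem etpValid_succ (n : Int) (cs : List Int) : ∀ a, etpValid n a cs → etpIsLast n cs = false →
    etpValid n a (etpSucc n cs) := by
  induction cs with
  | nil => intro a _ h; simp [etpIsLast] at h
  | cons c cs ih =>
    intro a ⟨h1, h2, h3⟩ hl
    simp only [etpIsLast, Bool.and_eq_false_iff] at hl
    by_cases hcs : etpIsLast n cs = true
    · have hc : ¬ (c + cs.length + 1 = n) := by
        rcases hl with h | h
        · simpa using h
        · rw [hcs] at h; simp at h
      have hlt : c + (cs.length : Int) + 1 < n := by omega
      rw [etpSucc, if_pos hcs]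
      refine ⟨by omega, by rw [etpFirst_length]; omega, ?_⟩
      rw [show c+1+1 = c+2 by ring]
      exact etpValid_first n cs.length (c+2) (by omega)
    · have hcs' : etpIsLast n cs = false := by simp at hcs; exact hcs
      rw [etpSucc, if_neg (by simp [hcs'])]
      exact ⟨h1, by rw [etpSucc_length]; exact h2, ih (c+1) h3 hcs'⟩

theorem etpComb_le (l : List Int) : ∀ r, (PySem.List.combinations l r).length ≤ 2 ^ l.length := by
  induction l with
  | nil => intro r; cases r <;> simp [PySem.List.combinations_zero, PySem.List.combinations_nil_succ]
  | cons x xs ih =>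
    intro r
    cases r with
    | zero =>
      simp [PySem.List.combinations_zero]
      exact Nat.one_le_two_pow
    | succ r =>
      rw [PySem.List.combinations_cons_succ]
      simp only [List.length_append, List.length_map, List.length_cons]
      have h1 := ih r
      have h2 := ih (r+1)
      calc (PySem.List.combinations xs r).length + (PySem.List.combinations xs (r+1)).length
          ≤ 2 ^ xs.length + 2 ^ xs.length := Nat.add_le_add h1 h2
        _ = 2 ^ (xs.length + 1) := by ring

theorem etpTail_len_le (n : Int) (cs : List Int) : ∀ a, 0 ≤ a → etpValid n a cs →
    (etpTail n cs).length ≤ (cs.length + 1) * 2 ^ n.toNat := by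
  induction cs with
  | nil =>
    intro a _ _
    simp [etpTail]
    exact Nat.one_le_two_pow
  | cons c cs ih =>
    intro a ha ⟨h1, h2, h3⟩
    rw [etpTail]
    simp only [List.length_append, List.length_map, List.length_cons]
    have hb := ih (c+1) (by omega) h3
    have hc : (PySem.List.combinations (PySem.List.pyRange (c+1) n 1) (cs.length + 1)).length
        ≤ 2 ^ n.toNat := by
      calc _ ≤ 2 ^ (PySem.List.pyRange (c+1) n 1).length := etpComb_le _ _
        _ ≤ 2 ^ n.toNat := by
            apply Nat.pow_le_pow_right (by omega)
            rw [PySem.List.length_pyRange_one]; omega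
    have he : (cs.length+1+1)*2^n.toNat = (cs.length+1)*2^n.toNat + 2^n.toNat := by ring
    omega


theorem etpGroupsOf_length (ws : List String) (cs : List Int) : ∀ b,
    (etpGroupsOf ws b cs).length = cs.length + 1 := by
  induction cs with
  | nil => intro b; rfl
  | cons c cs ih => intro b; simp [etpGroupsOf, ih]

theorem etpGroupsOf_flatten (ws : List String) (cs : List Int) : ∀ b, 0 ≤ b →
    etpValid (ws.length : Int) (b+1) cs →
    (etpGroupsOf ws b cs).flatten = PySem.List.slice ws (some b) none := by
  induction cs with
  | nil => intro b _ _; simp [etpGroupsOf]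
  | cons c cs ih =>
    intro b hb ⟨h1, h2, h3⟩
    simp only [etpGroupsOf, List.flatten_cons]
    rw [ih c (by omega) h3]
    exact sl_app_none ws b c hb (by omega)

theorem etpGroupsOf_ne_nil (ws : List String) (cs : List Int) : ∀ b, 0 ≤ b →
    b < (ws.length : Int) → etpValid (ws.length : Int) (b+1) cs →
    ∀ g ∈ etpGroupsOf ws b cs, g ≠ [] := by
  induction cs with
  | nil =>
    intro b hb hbn _ g hg
    simp [etpGroupsOf] at hg
    rw [hg]
    exact sl_none_ne_nil ws b hb hbn
  | cons c cs ih =>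
    intro b hb hbn ⟨h1, h2, h3⟩ g hg
    simp only [etpGroupsOf, List.mem_cons] at hg
    rcases hg with hg | hg
    · rw [hg]
      exact sl_ne_nil ws b c hb (by omega) (by have := cs.length; omega)
    · exact ih c (by omega) (by omega) h3 g hg

theorem etpHeads_first (ws : List String) (m : Nat) : ∀ a : Int, 0 ≤ a →
    etpHeads m (PySem.List.slice ws (some a) none) = etpGroupsOf ws a (etpFirst (a+1) m) := by
  induction m with
  | zero => intro a _; rfl
  | succ m ih =>
    intro a ha
    simp only [etpHeads, etpFirst, etpGroupsOf]
    rw [sl_take1_none ws a ha, sl_tail_none ws a ha, ih (a+1) (by omega),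
      show a+1+1 = a+2 by ring]

theorem etpZip_groups (ws : List String) (cs : List Int) : ∀ b, 0 ≤ b →
    etpValid (ws.length : Int) (b+1) cs →
    ((b :: (cs ++ [(ws.length : Int)])).zip (cs ++ [(ws.length : Int)])).map
      (fun ab => PySem.List.slice ws (some ab.1) (some ab.2)) = etpGroupsOf ws b cs := by
  induction cs with
  | nil =>
    intro b hb _
    simp [etpGroupsOf]
    exact sl_to_len ws b hb
  | cons c cs ih =>
    intro b hb ⟨h1, h2, h3⟩
    simp only [List.cons_append, List.zip_cons_cons, List.map_cons, etpGroupsOf]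
    rw [ih c (by omega) h3]

theorem etpRender_eq (ws : List String) (cs : List Int) (h : etpValid (ws.length : Int) 1 cs) :
    etpAltRender ws (ws.length : Int) cs = etpRender (etpGroupsOf ws 0 cs) := by
  unfold etpAltRender etpRender
  simp only []
  have hz := etpZip_groups ws cs 0 (le_refl 0) (by simpa using h)
  rw [show (0 :: cs ++ [(ws.length : Int)]).tail = cs ++ [(ws.length : Int)] from rfl,
    show ((0 : Int) :: cs ++ [(ws.length : Int)]) = 0 :: (cs ++ [(ws.length : Int)]) from rfl,
    ← hz, List.map_map]
  rfl


def etpFindOpt (gs : List (List String)) : Option Int :=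
  ((PySem.List.pyRange 0 gs.length 1).reverse).findSome? (fun i =>
    if (PySem.List.pyGetD gs i []).length > 1 then some i else none)

theorem etpFindSome_congr {α : Type} (l : List α) (f f' : α → Option Int)
    (h : ∀ x ∈ l, f x = f' x) : l.findSome? f = l.findSome? f' := by
  induction l with
  | nil => rfl
  | cons x l ih =>
    simp only [List.findSome?_cons, h x (by simp)]
    cases f' x with
    | none => exact ih (fun y hy => h y (by simp [hy]))
    | some v => rfl

theorem etpFindSome_map_shift {α : Type} (l : List α) (f : α → Option Int) :
    l.findSome? (fun x => (f x).map (fun i => 1 + i)) = (l.findSome? f).map (fun i => 1 + i) := by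
  induction l with
  | nil => rfl
  | cons x l ih =>
    simp only [List.findSome?_cons]
    cases hf : f x <;> simp [ih]

theorem etpFindOpt_cons (g : List String) (gs : List (List String)) :
    etpFindOpt (g :: gs) = (match etpFindOpt gs with
      | some i => some (1 + i)
      | none => if g.length > 1 then some 0 else none) := by
  rw [etpFindOpt, etpFindOpt]
  have hsplit : PySem.List.pyRange 0 ((g :: gs).length : Int) 1 =
      PySem.List.pyRange 0 1 1 ++ PySem.List.pyRange 1 ((g :: gs).length : Int) 1 :=
    PySem.List.pyRange_one_append 0 1 _ (by omega) (by simp)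
  rw [hsplit, List.reverse_append]
  have h01 : PySem.List.pyRange 0 1 1 = [0] := by
    have := PySem.List.pyRange_one_singleton (a := (0 : Int))
    simpa using this
  have hmap : PySem.List.pyRange 1 ((g :: gs).length : Int) 1 =
      (PySem.List.pyRange 0 (gs.length : Int) 1).map (fun i => 1 + i) := by
    rw [PySem.List.pyRange_one, PySem.List.pyRange_one]
    simp [List.map_map]
  rw [h01, hmap, ← List.map_reverse, List.findSome?_append, List.findSome?_map]
  have hcong : ((PySem.List.pyRange 0 (gs.length:Int) 1).reverse).findSome?
      ((fun i => if (PySem.List.pyGetD (g :: gs) i []).length > 1 then some i else none) ∘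
        (fun i => 1 + i))
      = ((PySem.List.pyRange 0 (gs.length:Int) 1).reverse).findSome? (fun i =>
          (if (PySem.List.pyGetD gs i []).length > 1 then some i else none).map (fun j => 1 + j)) := by
    apply etpFindSome_congr
    intro i hi
    rw [List.mem_reverse, PySem.List.mem_pyRange_one] at hi
    obtain ⟨m, rfl⟩ := Int.eq_ofNat_of_zero_le hi.1
    simp only [Function.comp]
    rw [show (1 : Int) + (m : Int) = ((m + 1 : Nat) : Int) by push_cast; ring]
    rw [PySem.List.pyGetD_natCast, PySem.List.pyGetD_natCast]
    simp only [List.getD_cons_succ]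
    split <;> simp [show ((m + 1 : Nat) : Int) = 1 + (m : Int) by push_cast; ring]
  rw [hcong, etpFindSome_map_shift]
  cases hopt : ((PySem.List.pyRange 0 (gs.length:Int) 1).reverse).findSome? (fun i =>
      if (PySem.List.pyGetD gs i []).length > 1 then some i else none) with
  | some v => simp
  | none =>
    simp [PySem.List.pyGetD_zero_cons]

theorem etpFindC_eq_opt (gs : List (List String)) (k : Int) (hk : k = (gs.length : Int)) :
    etpFindC k gs = (etpFindOpt gs).getD 0 := by
  rw [etpFindC, etpFindOpt, hk]

theorem etpFindOpt_groups_last (ws : List String) (cs : List Int) : ∀ b : Int, 0 ≤ b →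
    b < (ws.length : Int) → etpValid (ws.length : Int) (b+1) cs →
    etpIsLast (ws.length : Int) cs = true →
    etpFindOpt (etpGroupsOf ws b cs) =
      if 1 < (ws.length : Int) - cs.length - b then some 0 else none := by
  induction cs with
  | nil =>
    intro b hb hbn _ _
    rw [show etpGroupsOf ws b [] = [PySem.List.slice ws (some b) none] from rfl]
    rw [show ([PySem.List.slice ws (some b) none] : List (List String))
        = PySem.List.slice ws (some b) none :: [] from rfl, etpFindOpt_cons]
    rw [show etpFindOpt [] = none from rfl]
    have hl := sl_len_none ws b hb (le_of_lt hbn)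
    simp only [List.length_nil, Nat.cast_zero]
    split <;> split <;> first | rfl | omega
  | cons c cs ih =>
    intro b hb hbn ⟨h1, h2, h3⟩ hlast
    simp only [etpIsLast, Bool.and_eq_true, beq_iff_eq] at hlast
    obtain ⟨hc, hcs⟩ := hlast
    rw [show etpGroupsOf ws b (c :: cs)
        = PySem.List.slice ws (some b) (some c) :: etpGroupsOf ws c cs from rfl, etpFindOpt_cons]
    rw [ih c (by omega) (by omega) h3 hcs]
    rw [if_neg (by omega)]
    have hl := sl_len_some ws b c hb (by omega) (by omega)
    simp only [List.length_cons]
    split <;> split <;> first | rfl | omega | push_cast; omega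

theorem etpFindOpt_groups_not_last (ws : List String) (cs : List Int) : ∀ b : Int, 0 ≤ b →
    b < (ws.length : Int) → etpValid (ws.length : Int) (b+1) cs →
    etpIsLast (ws.length : Int) cs = false →
    etpFindOpt (etpGroupsOf ws b cs) = some ((etpCOf (ws.length : Int) cs : Nat) : Int) := by
  induction cs with
  | nil => intro b _ _ _ h; simp [etpIsLast] at h
  | cons c cs ih =>
    intro b hb hbn ⟨h1, h2, h3⟩ hlast
    rw [show etpGroupsOf ws b (c :: cs)
        = PySem.List.slice ws (some b) (some c) :: etpGroupsOf ws c cs from rfl, etpFindOpt_cons]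
    simp only [etpIsLast, Bool.and_eq_false_iff] at hlast
    by_cases hcs : etpIsLast (ws.length : Int) cs = true
    · have hcne : ¬ (c + (cs.length : Int) + 1 = (ws.length : Int)) := by
        rcases hlast with h | h
        · simpa using h
        · rw [hcs] at h; simp at h
      rw [etpFindOpt_groups_last ws cs c (by omega) (by omega) h3 hcs, if_pos (by omega)]
      rw [etpCOf, if_pos hcs]
      norm_num
    · have hcs' : etpIsLast (ws.length : Int) cs = false := by simpa using hcs
      rw [ih c (by omega) (by omega) h3 hcs']
      simp only [etpCOf, hcs', if_false, Bool.false_eq_true]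
      push_cast
      ring_nf

def etpCasBody : List (List String) → Int → List (List String) :=
  fun gs i =>
    let gi := PySem.List.pyGetD gs i []
    let gs1 := PySem.List.pySetD gs (i+1)
        (PySem.List.slice gi (some 1) none ++ PySem.List.pyGetD gs (i+1) [])
    PySem.List.pySetD gs1 i [PySem.List.pyGetD gi 0 ""]

theorem etpStep_eq_cascade (k c : Int) (groups : List (List String)) :
    etpStep k c groups =
      (PySem.List.pyRange c (k-1) 1).foldl etpCasBody
        (PySem.List.pySetD
          (PySem.List.pySetD groups (c-1)
            (PySem.List.pyGetD groups (c-1) [] ++ [PySem.List.pyGetD (PySem.List.pyGetD groups c []) 0 ""]))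
          c (PySem.List.slice (PySem.List.pyGetD groups c []) (some 1) none)) := rfl

theorem etpCasBody_eq (P : List (List String)) (gi gn : List String) (rest : List (List String)) :
    etpCasBody (P ++ gi :: gn :: rest) (P.length : Int)
      = P ++ [gi.getD 0 ""] :: (gi.tail ++ gn) :: rest := by
  unfold etpCasBody
  simp only []
  have hget : PySem.List.pyGetD (P ++ gi :: gn :: rest) (P.length : Int) [] = gi := by
    rw [PySem.List.pyGetD_natCast]
    simp [List.getD]
  have hget1 : PySem.List.pyGetD (P ++ gi :: gn :: rest) ((P.length : Int) + 1) [] = gn := by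
    rw [show (P.length : Int) + 1 = ((P.length + 1 : Nat) : Int) by push_cast; ring,
      PySem.List.pyGetD_natCast]
    simp [List.getD]
  rw [hget, hget1]
  rw [show (P.length : Int) + 1 = ((P.length + 1 : Nat) : Int) by push_cast; ring,
    PySem.List.pySetD_natCast, PySem.List.pySetD_natCast]
  rw [List.set_append_right _ _ (by omega), show P.length + 1 - P.length = 1 by omega]
  simp only [List.set_cons_succ, List.set_cons_zero]
  rw [List.set_append_right _ _ (by omega), show P.length - P.length = 0 by omega]
  simp only [List.set_cons_zero]
  rw [PySem.List.slice_from_one, PySem.List.pyGetD_zero]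

theorem etpCascade (m : Nat) : ∀ (P : List (List String)) (s : List String)
    (rest : List (List String)) (c : Int), c = (P.length : Int) → rest.length = m →
    (1 ≤ m → s ≠ []) → (∀ g ∈ rest.dropLast, g ≠ []) →
    (PySem.List.pyRange c (c + m) 1).foldl etpCasBody (P ++ s :: rest)
      = P ++ etpHeads m (s :: rest).flatten := by
  induction m with
  | zero =>
    intro P s rest c hc hr _ _
    rw [List.length_eq_zero_iff] at hr
    subst hr hc
    rw [show (P.length : Int) + (0:Nat) = (P.length : Int) by push_cast; ring,
      PySem.List.pyRange_one_eq_nil (by omega)]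
    simp [etpHeads]
  | succ m ih =>
    intro P s rest c hc hr hs hne
    obtain ⟨gn, rest', rfl⟩ : ∃ gn rest', rest = gn :: rest' := by
      cases rest with
      | nil => simp at hr
      | cons a b => exact ⟨a, b, rfl⟩
    have hr' : rest'.length = m := by simpa using hr
    subst hc
    rw [PySem.List.pyRange_one_cons (by push_cast; omega), List.foldl_cons, etpCasBody_eq]
    have hP1 : ((P.length : Int) + 1) = (((P ++ [[s.getD 0 ""]]).length : Nat) : Int) := by
      simp
    rw [show (P.length : Int) + ((m+1 : Nat) : Int) = ((P ++ [[s.getD 0 ""]]).length : Int) + (m : Int) by simp; push_cast; ring]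
    rw [hP1]
    rw [show P ++ [s.getD 0 ""] :: (s.tail ++ gn) :: rest'
        = (P ++ [[s.getD 0 ""]]) ++ (s.tail ++ gn) :: rest' by simp]
    obtain ⟨a, s', rfl⟩ : ∃ a s', s = a :: s' := by
      cases s with
      | nil => exact absurd rfl (hs (by omega))
      | cons a b => exact ⟨a, b, rfl⟩
    rw [ih (P ++ [[(a :: s').getD 0 ""]]) ((a :: s').tail ++ gn) rest' _ rfl hr'
        (fun hm => by
          have hgn : gn ≠ [] := hne gn (by
            have : rest' ≠ [] := by intro hcon; rw [hcon] at hr'; simp at hr'; omega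
            simp [List.dropLast_cons_of_ne_nil this])
          simp [hgn])
        (fun g hg => hne g (by
          have : rest' ≠ [] := List.ne_nil_of_mem (List.mem_of_mem_dropLast hg)
          simp [List.dropLast_cons_of_ne_nil this]
          right; exact hg))]
    simp only [List.append_assoc, List.cons_append, List.nil_append]
    congr 1
    rw [show etpHeads (m+1) ((a :: s') :: gn :: rest').flatten
        = (((a :: s') :: gn :: rest').flatten.take 1)
          :: etpHeads m (((a :: s') :: gn :: rest').flatten.tail) from rfl]
    simp [etpHeads]

theorem etpCOf_bounds (n : Int) (cs : List Int) (h : etpIsLast n cs = false) :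
    1 ≤ etpCOf n cs ∧ etpCOf n cs ≤ cs.length := by
  induction cs with
  | nil => simp [etpIsLast] at h
  | cons c cs ih =>
    rw [etpCOf]
    by_cases hcs : etpIsLast n cs = true
    · rw [if_pos hcs]; simp
    · have hcs' : etpIsLast n cs = false := by simpa using hcs
      rw [if_neg (by simp [hcs'])]
      have := ih hcs'
      simp; omega

theorem etpDrop_getD {α : Type} (l : List α) (j : Nat) (d : α) (h : j < l.length) :
    l.drop j = l.getD j d :: l.drop (j+1) := by
  rw [List.drop_eq_getElem_cons h, List.getD_eq_getElem _ _ h]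

theorem sl_getD0_none (ws : List String) (a : Int) (h0 : 0 ≤ a) :
    (PySem.List.slice ws (some a) none).getD 0 "" = ws.getD a.toNat "" := by
  rw [PySem.List.slice_from ws h0]
  simp [List.getD]

theorem sl_getD0_some (ws : List String) (a b : Int) (h0 : 0 ≤ a) (hab : a + 1 ≤ b) :
    (PySem.List.slice ws (some a) (some b)).getD 0 "" = ws.getD a.toNat "" := by
  rw [PySem.List.slice_toNat ws h0 (by omega)]
  simp [List.getD, List.getElem?_take]
  rw [if_pos (by omega)]

theorem etpPivot (ws : List String) (cs : List Int) : ∀ b : Int, 0 ≤ b →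
    etpValid (ws.length : Int) (b+1) cs → etpIsLast (ws.length : Int) cs = false →
    2 ≤ (((etpGroupsOf ws b cs).getD (etpCOf (ws.length : Int) cs) []) : List String).length := by
  induction cs with
  | nil => intro b _ _ h; simp [etpIsLast] at h
  | cons c cs ih =>
    intro b hb ⟨h1, h2, h3⟩ hlast
    rw [show etpGroupsOf ws b (c :: cs)
      = PySem.List.slice ws (some b) (some c) :: etpGroupsOf ws c cs from rfl]
    simp only [etpIsLast, Bool.and_eq_false_iff] at hlast
    by_cases hcs : etpIsLast (ws.length : Int) cs = true
    · have hc : ¬ (c + (cs.length : Int) + 1 = (ws.length : Int)) := by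
        rcases hlast with h | h
        · simpa using h
        · rw [hcs] at h; simp at h
      rw [etpCOf, if_pos hcs]
      simp only [List.getD_cons_succ]
      cases cs with
      | nil =>
        rw [show etpGroupsOf ws c [] = [PySem.List.slice ws (some c) none] from rfl]
        simp only [List.getD_cons_zero]
        have := sl_len_none ws c (by omega) (by omega)
        simp at hc h2 ⊢
        omega
      | cons c1 cs' =>
        rw [show etpGroupsOf ws c (c1 :: cs')
          = PySem.List.slice ws (some c) (some c1) :: etpGroupsOf ws c1 cs' from rfl]
        simp only [List.getD_cons_zero]
        obtain ⟨g1, g2, g3⟩ := h3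
        simp only [etpIsLast, Bool.and_eq_true, beq_iff_eq] at hcs
        obtain ⟨hc1, _⟩ := hcs
        have := sl_len_some ws c c1 (by omega) (by omega) (by omega)
        simp only [List.length_cons] at hc h2 hc1
        push_cast at hc h2 hc1 ⊢
        omega
    · have hcs' : etpIsLast (ws.length : Int) cs = false := by simpa using hcs
      rw [etpCOf, if_neg (by simp [hcs'])]
      simp only [List.getD_cons_succ]
      exact ih c (by omega) h3 hcs'

theorem sl_single_str (ws : List String) (a : Int) (h0 : 0 ≤ a) (ha : a < (ws.length : Int)) :
    PySem.List.slice ws (some a) (some (a+1)) = [ws.getD a.toNat ""] :=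
  sl_single ws a h0 ha

theorem sl_snoc (ws : List String) (a b : Int) (h0 : 0 ≤ a) (hab : a ≤ b)
    (hb : b < (ws.length : Int)) :
    PySem.List.slice ws (some a) (some b) ++ [ws.getD b.toNat ""]
      = PySem.List.slice ws (some a) (some (b+1)) := by
  rw [← sl_single_str ws b (by omega) hb]
  exact sl_app ws a b (b+1) h0 hab (by omega)

theorem etpSuccGroups (ws : List String) (cs : List Int) : ∀ b : Int, 0 ≤ b →
    etpValid (ws.length : Int) (b+1) cs → etpIsLast (ws.length : Int) cs = false →
    (etpGroupsOf ws b cs).take (etpCOf (ws.length : Int) cs - 1)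
      ++ [((etpGroupsOf ws b cs).getD (etpCOf (ws.length : Int) cs - 1) [])
          ++ [((etpGroupsOf ws b cs).getD (etpCOf (ws.length : Int) cs) []).getD 0 ""]]
      ++ etpHeads (cs.length - etpCOf (ws.length : Int) cs)
          (((((etpGroupsOf ws b cs).getD (etpCOf (ws.length : Int) cs) []) : List String).tail)
            :: (etpGroupsOf ws b cs).drop (etpCOf (ws.length : Int) cs + 1)).flatten
    = etpGroupsOf ws b (etpSucc (ws.length : Int) cs) := by
  induction cs with
  | nil => intro b _ _ h; simp [etpIsLast] at h
  | cons c cs ih =>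
    intro b hb ⟨h1, h2, h3⟩ hlast
    simp only [etpIsLast, Bool.and_eq_false_iff] at hlast
    by_cases hcs : etpIsLast (ws.length : Int) cs = true
    · have hc : ¬ (c + (cs.length : Int) + 1 = (ws.length : Int)) := by
        rcases hlast with h | h
        · simpa using h
        · rw [hcs] at h; simp at h
      rw [etpCOf, if_pos hcs, etpSucc, if_pos hcs]
      rw [show etpGroupsOf ws b (c :: cs)
        = PySem.List.slice ws (some b) (some c) :: etpGroupsOf ws c cs from rfl]
      rw [show etpGroupsOf ws b ((c+1) :: etpFirst (c+2) cs.length)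
        = PySem.List.slice ws (some b) (some (c+1))
            :: etpGroupsOf ws (c+1) (etpFirst (c+2) cs.length) from rfl]
      simp only [List.take_zero, List.getD_cons_zero, List.getD_cons_succ, List.drop_succ_cons,
        List.nil_append, Nat.sub_self]
      cases cs with
      | nil =>
        rw [show etpGroupsOf ws c [] = [PySem.List.slice ws (some c) none] from rfl]
        simp only [List.getD_cons_zero, List.drop_succ_cons, List.drop_nil, List.length_nil]
        rw [sl_getD0_none ws c (by omega), sl_tail_none ws c (by omega)]
        rw [sl_snoc ws b c hb (by omega) (by simpa using h2)]
        simp [etpHeads, etpFirst, etpGroupsOf]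
      | cons c1 cs' =>
        obtain ⟨g1, g2, g3⟩ := h3
        simp only [etpIsLast, Bool.and_eq_true, beq_iff_eq] at hcs
        obtain ⟨hc1, hcs2⟩ := hcs
        rw [show etpGroupsOf ws c (c1 :: cs')
          = PySem.List.slice ws (some c) (some c1) :: etpGroupsOf ws c1 cs' from rfl]
        simp only [List.getD_cons_zero, List.drop_succ_cons, List.drop_zero, List.length_cons]
        have hcc1 : c + 2 ≤ c1 := by
          simp only [List.length_cons] at hc h2
          push_cast at hc h2 hc1 ⊢
          omega
        have hc1n : c1 ≤ (ws.length : Int) := by push_cast at hc1; omega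
        rw [sl_getD0_some ws c c1 (by omega) (by omega),
          sl_tail_some ws c c1 (by omega) (by omega)]
        rw [List.flatten_cons, etpGroupsOf_flatten ws cs' c1 (by omega) g3]
        rw [sl_app_none ws (c+1) c1 (by omega) (by omega)]
        rw [show cs'.length + 1 + 1 - 1 = cs'.length + 1 from by omega]
        rw [etpHeads_first ws (cs'.length + 1) (c+1) (by omega), show c+1+1 = c+2 by ring]
        rw [sl_snoc ws b c hb (by omega) (by omega)]
        rfl
    · have hcs' : etpIsLast (ws.length : Int) cs = false := by simpa using hcs
      rw [etpCOf, if_neg (by simp [hcs']), etpSucc, if_neg (by simp [hcs'])]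
      rw [show etpGroupsOf ws b (c :: cs)
        = PySem.List.slice ws (some b) (some c) :: etpGroupsOf ws c cs from rfl]
      rw [show etpGroupsOf ws b (c :: etpSucc (ws.length : Int) cs)
        = PySem.List.slice ws (some b) (some c)
            :: etpGroupsOf ws c (etpSucc (ws.length : Int) cs) from rfl]
      have hj := etpCOf_bounds (ws.length : Int) cs hcs'
      have hcofe : etpCOf (ws.length : Int) cs + 1 - 1 = (etpCOf (ws.length : Int) cs - 1) + 1 := by omega
      rw [hcofe, List.take_succ_cons]
      simp only [List.getD_cons_succ, List.length_cons]
      rw [show cs.length + 1 - (etpCOf (ws.length : Int) cs + 1) = cs.length - etpCOf (ws.length : Int) cs from by omega]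
      rw [List.drop_succ_cons]
      rw [← ih c (by omega) h3 hcs']
      simp

theorem etpStep_succ (ws : List String) (cs : List Int) (b : Int) (hb : 0 ≤ b)
    (hbn : b < (ws.length : Int)) (hv : etpValid (ws.length : Int) (b+1) cs)
    (hl : etpIsLast (ws.length : Int) cs = false) :
    etpStep ((cs.length : Int)+1) ((etpCOf (ws.length : Int) cs : Nat) : Int) (etpGroupsOf ws b cs)
      = etpGroupsOf ws b (etpSucc (ws.length : Int) cs) := by
  have hj := etpCOf_bounds (ws.length : Int) cs hl
  set j := etpCOf (ws.length : Int) cs with hjdef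
  set G := etpGroupsOf ws b cs with hGdef
  have hGlen : G.length = cs.length + 1 := etpGroupsOf_length ws cs b
  have hjlt : j < G.length := by omega
  have hj1lt : j - 1 < G.length := by omega
  rw [etpStep_eq_cascade]
  rw [show ((j : Nat) : Int) - 1 = ((j - 1 : Nat) : Int) by omega]
  rw [PySem.List.pyGetD_natCast, PySem.List.pyGetD_natCast, PySem.List.pyGetD_zero,
    PySem.List.slice_from_one, PySem.List.pySetD_natCast, PySem.List.pySetD_natCast]
  have hsets : (G.set (j-1) (G.getD (j-1) [] ++ [(G.getD j []).getD 0 ""])).set j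
      ((G.getD j []).tail)
      = (G.take (j-1) ++ [G.getD (j-1) [] ++ [(G.getD j []).getD 0 ""]])
        ++ (G.getD j []).tail :: G.drop (j+1) := by
    rw [List.set_eq_take_cons_drop _ hj1lt]
    rw [List.set_append_right _ _ (by simp [List.length_take_of_le (le_of_lt hj1lt)]; try omega)]
    rw [show j - (G.take (j-1) : List (List String)).length = 1 by
      simp [List.length_take_of_le (le_of_lt hj1lt)]; try omega]
    simp only [List.set_cons_succ]
    rw [show (j - 1) + 1 = j from by omega]
    rw [etpDrop_getD G j [] hjlt]
    simp only [List.set_cons_zero]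
    simp
  rw [hsets]
  rw [show ((cs.length : Int) + 1) - 1 = ((j : Nat) : Int) + ((cs.length - j : Nat) : Int) by push_cast; omega]
  rw [etpCascade (cs.length - j)
      (G.take (j-1) ++ [G.getD (j-1) [] ++ [(G.getD j []).getD 0 ""]])
      ((G.getD j []).tail) (G.drop (j+1)) _
      (by simp [List.length_take_of_le (le_of_lt hj1lt)]; try omega)
      (by simp [hGlen]; try omega)
      (fun _ => by
        have hp := etpPivot ws cs b hb hv hl
        rw [← hjdef, ← hGdef] at hp
        intro hcon
        have h0 : ((G.getD j []).tail).length = 0 := by rw [hcon]; rfl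
        rw [List.length_tail] at h0
        omega)
      (fun g hg => etpGroupsOf_ne_nil ws cs b hb hbn hv g
        (by
          have := List.mem_of_mem_dropLast hg
          exact List.mem_of_mem_drop this))]
  exact etpSuccGroups ws cs b hb hv hl

theorem etpTail_cons (n : Int) (cs : List Int) (a : Int) (hv : etpValid n a cs) :
    ∃ t, etpTail n cs = cs :: t := by
  by_cases h : etpIsLast n cs = true
  · exact ⟨[], etpT2a n cs a hv h⟩
  · exact ⟨_, etpT2b n cs a hv (by simpa using h)⟩

theorem etpLoop_eq (ws : List String) : ∀ (fuel : Nat) (cs : List Int) (acc : List String),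
    etpValid (ws.length : Int) 1 cs → 0 < (ws.length : Int) →
    (etpTail (ws.length : Int) cs).length ≤ fuel + 1 →
    etpLoop ((cs.length : Int)+1) fuel (etpGroupsOf ws 0 cs) acc
      = acc ++ ((etpTail (ws.length : Int) cs).map (etpAltRender ws (ws.length : Int))).tail := by
  intro fuel
  induction fuel with
  | zero =>
    intro cs acc hv hn hfuel
    obtain ⟨t, ht⟩ := etpTail_cons (ws.length : Int) cs 1 hv
    rw [ht] at hfuel ⊢
    have : t = [] := by
      rw [List.length_cons] at hfuel
      exact List.eq_nil_of_length_eq_zero (by omega)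
    subst this
    simp [etpLoop]
  | succ fuel ih =>
    intro cs acc hv hn hfuel
    have hk : ((cs.length : Int) + 1) = (((etpGroupsOf ws 0 cs).length : Nat) : Int) := by
      rw [etpGroupsOf_length]; push_cast; ring
    by_cases hlast : etpIsLast (ws.length : Int) cs = true
    · have hfind : etpFindC ((cs.length : Int)+1) (etpGroupsOf ws 0 cs) = 0 := by
        rw [etpFindC_eq_opt _ _ hk,
          etpFindOpt_groups_last ws cs 0 (le_refl 0) hn (by simpa using hv) hlast]
        split <;> rfl
      rw [etpLoop, hfind, if_pos rfl, etpT2a (ws.length : Int) cs 1 hv hlast]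
      simp
    · have hlast' : etpIsLast (ws.length : Int) cs = false := by simpa using hlast
      have hfind : etpFindC ((cs.length : Int)+1) (etpGroupsOf ws 0 cs)
          = ((etpCOf (ws.length : Int) cs : Nat) : Int) := by
        rw [etpFindC_eq_opt _ _ hk,
          etpFindOpt_groups_not_last ws cs 0 (le_refl 0) hn (by simpa using hv) hlast']
        rfl
      have hj := etpCOf_bounds (ws.length : Int) cs hlast'
      rw [etpLoop, hfind, if_neg (by simp; omega)]
      rw [etpStep_succ ws cs 0 (le_refl 0) hn (by simpa using hv) hlast']
      show etpLoop ((cs.length : Int)+1) fuel (etpGroupsOf ws 0 (etpSucc (ws.length : Int) cs))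
          (acc ++ [etpRender (etpGroupsOf ws 0 (etpSucc (ws.length : Int) cs))]) = _
      rw [← etpRender_eq ws (etpSucc (ws.length : Int) cs)
        (etpValid_succ (ws.length : Int) cs 1 hv hlast')]
      rw [show ((cs.length : Int) + 1)
          = (((etpSucc (ws.length : Int) cs).length : Nat) : Int) + 1 by
        rw [etpSucc_length]]
      rw [ih (etpSucc (ws.length : Int) cs) _
        (etpValid_succ (ws.length : Int) cs 1 hv hlast') hn
        (by
          have := etpT2b (ws.length : Int) cs 1 hv hlast'
          rw [this, List.length_cons] at hfuel
          omega)]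
      rw [etpT2b (ws.length : Int) cs 1 hv hlast']
      obtain ⟨t, ht⟩ := etpTail_cons (ws.length : Int) (etpSucc (ws.length : Int) cs) 1
        (etpValid_succ (ws.length : Int) cs 1 hv hlast')
      rw [ht]
      simp

theorem etpHeads_range (r : Nat) : ∀ ws : List String, r ≤ ws.length →
    etpHeads r ws = (List.range r).map (fun i => [ws.getD i ""]) ++ [ws.drop r] := by
  induction r with
  | zero => intro ws _; simp [etpHeads]
  | succ r ih =>
    intro ws hr
    cases ws with
    | nil => simp at hr
    | cons w ws' =>
      rw [show etpHeads (r+1) (w :: ws')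
        = (w :: ws').take 1 :: etpHeads r (w :: ws').tail from rfl]
      simp only [List.take_succ_cons, List.take_zero, List.tail_cons]
      rw [ih ws' (by simpa using hr)]
      rw [List.range_succ_eq_map]
      simp [List.getD_cons_succ, Function.comp]

theorem etpInit (ws : List String) : ∀ r : Nat, r ≤ ws.length →
    (PySem.List.pyRange 0 (r : Int) 1).foldl
      (fun (st : List (List String) × List String) _ =>
        (st.1 ++ [[PySem.List.pyGetD st.2 0 ""]], PySem.List.slice st.2 (some 1) none)) ([], ws)
    = ((List.range r).map (fun i => [ws.getD i ""]), ws.drop r) := by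
  intro r
  induction r with
  | zero => intro _; simp [PySem.List.pyRange_one_eq_nil]
  | succ r ih =>
    intro hr
    rw [show ((r+1 : Nat) : Int) = (r : Int) + 1 by push_cast; ring,
      PySem.List.pyRange_one_succ_right (by positivity), List.foldl_append,
      ih (by omega)]
    simp only [List.foldl_cons, List.foldl_nil]
    rw [PySem.List.pyGetD_zero, PySem.List.slice_from_one, List.tail_drop]
    rw [List.range_succ]
    simp [List.getD, List.getElem?_drop]

-- ===== VERDICT (by name: the statement is the Claim_ definition above) =====
theorem enumerate_text_partitions_spec : Claim_equal_enumerate_text_partitions := by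
  intro text k _ hpre
  unfold Pre_enumerate_text_partitions at hpre
  unfold Spec_enumerate_text_partitions
  simp only [enumerate_text_partitions, enumerate_text_partitions_alt]
  set ws := (PySem.Str.split? text " ").getD [] with hws
  have hnot : ¬ ((ws.length : Int) < k) := by omega
  rw [if_neg hnot, if_neg hnot]
  have hfuelpos : 0 < 2 ^ ws.length * (ws.length + 1) := by positivity
  by_cases hk : k ≤ 1
  · -- k ≤ 1 : a single partition on both sides
    have hmax : (max (k-1) 0).toNat = 0 := by
      rw [max_eq_right (by omega : k - 1 ≤ 0)]
      rfl
    rw [hmax, PySem.List.combinations_zero]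
    rw [PySem.List.pyRange_one_eq_nil (by omega : k - 1 ≤ 0)]
    simp only [List.foldl_nil, List.nil_append, List.map_cons, List.map_nil]
    obtain ⟨f, hf⟩ : ∃ f, 2 ^ ws.length * (ws.length + 1) = f + 1 :=
      ⟨2 ^ ws.length * (ws.length + 1) - 1, by omega⟩
    rw [hf, etpLoop]
    have hfind : etpFindC k [ws] = 0 := by
      by_cases hk0 : k ≤ 0
      · rw [etpFindC, PySem.List.pyRange_one_eq_nil (by omega)]
        rfl
      · have hk1 : k = 1 := by omega
        subst hk1
        rw [etpFindC, show PySem.List.pyRange 0 1 1 = [0] by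
          have := PySem.List.pyRange_one_singleton (a := (0 : Int))
          simpa using this]
        simp only [List.reverse_cons, List.reverse_nil, List.nil_append, List.findSome?_cons]
        by_cases hgt : (PySem.List.pyGetD [ws] 0 []).length > 1
        · rw [if_pos hgt]
          rfl
        · rw [if_neg hgt]
          rfl
    rw [hfind, if_pos rfl]
    have hgr : etpGroupsOf ws 0 ([] : List Int) = [ws] := by
      rw [show etpGroupsOf ws 0 ([] : List Int) = [PySem.List.slice ws (some 0) none] from rfl,
        sl_zero_none]
    rw [etpRender_eq ws [] trivial, hgr]
  · -- k ≥ 2 : the full enumeration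
    have hk2 : 2 ≤ k := by omega
    set r : Nat := (k - 1).toNat with hrdef
    have hrk : ((r : Nat) : Int) = k - 1 := by omega
    have hrlen : r ≤ ws.length := by omega
    have hn0 : 0 < (ws.length : Int) := by omega
    have hmax : (max (k-1) 0).toNat = r := by omega
    have hvfirst : etpValid (ws.length : Int) 1 (etpFirst 1 r) :=
      etpValid_first (ws.length : Int) r 1 (by omega)
    rw [hmax]
    rw [show k - 1 = ((r : Nat) : Int) from hrk.symm, etpInit ws r hrlen]
    simp only []
    have hgr : (List.range r).map (fun i => [ws.getD i ""]) ++ [ws.drop r]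
        = etpGroupsOf ws 0 (etpFirst 1 r) := by
      rw [← etpHeads_range r ws hrlen]
      have := etpHeads_first ws r 0 (le_refl 0)
      rw [sl_zero_none] at this
      rw [this]
      norm_num
    rw [hgr]
    rw [show k = (((etpFirst 1 r).length : Nat) : Int) + 1 by rw [etpFirst_length]; omega]
    rw [etpLoop_eq ws _ (etpFirst 1 r) _ hvfirst hn0
      (by
        have hle := etpTail_len_le (ws.length : Int) (etpFirst 1 r) 1 (by omega) hvfirst
        rw [etpFirst_length] at hle
        have h2 : ((ws.length : Int)).toNat = ws.length := by omega
        rw [h2] at hle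
        have : (r + 1) * 2 ^ ws.length ≤ (ws.length + 1) * 2 ^ ws.length :=
          Nat.mul_le_mul_right _ (by omega)
        have hcomm : (ws.length + 1) * 2 ^ ws.length = 2 ^ ws.length * (ws.length + 1) :=
          Nat.mul_comm _ _
        omega)]
    rw [etpT1 (ws.length : Int) r 1 (by omega)]
    obtain ⟨t, ht⟩ := etpTail_cons (ws.length : Int) (etpFirst 1 r) 1 hvfirst
    rw [← etpT1 (ws.length : Int) r 1 (by omega), ht]
    simp only [List.map_cons, List.tail_cons, List.cons_append, List.nil_append]
    rw [etpRender_eq ws (etpFirst 1 r) hvfirst]
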